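-- pv_equiv track=rewrite | github.com/tranductri2003/competitive_programming | ICPC/ICPC Trainning - 2021 ICPC Gran Premio de Mexico 1ra Fecha/L_Leonel_and_the_powers_of_two.py | solve
-- ===== SOURCE A (Python) =====
-- def solve(n):
--     if n==1:
--         return "2"
--     else:
--         if n%2==0:
--             return "("+solve(n//2)+")^2"
--         else:
--             return "(2*"+solve(n-1)+")"
-- ===== SOURCE B (Python) =====
-- def solve(n):
--     # Iterative: record the operations while reducing n to 1, then build
--     # the expression string by replaying them in reverse from "2".
--     ops = []
--     while n > 1:
--         if n % 2 == 0:
--             ops.append('square')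
--             n //= 2
--         else:
--             ops.append('times2')
--             n -= 1
--     s = "2"
--     for op in reversed(ops):
--         if op == 'square':
--             s = "(" + s + ")^2"
--         else:
--             s = "(2*" + s + ")"
--     return s
-- ===== Notes on version B (the rewrite author's own statement) =====
-- stated objective: alternative
-- what changed: Replaced the recursive string construction with an explicit two-phase iteration: a while-loop collects the square/times2 operations while reducing n to 1, then a reverse fold over that op list builds the identical string from "2".
import Mathlib
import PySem

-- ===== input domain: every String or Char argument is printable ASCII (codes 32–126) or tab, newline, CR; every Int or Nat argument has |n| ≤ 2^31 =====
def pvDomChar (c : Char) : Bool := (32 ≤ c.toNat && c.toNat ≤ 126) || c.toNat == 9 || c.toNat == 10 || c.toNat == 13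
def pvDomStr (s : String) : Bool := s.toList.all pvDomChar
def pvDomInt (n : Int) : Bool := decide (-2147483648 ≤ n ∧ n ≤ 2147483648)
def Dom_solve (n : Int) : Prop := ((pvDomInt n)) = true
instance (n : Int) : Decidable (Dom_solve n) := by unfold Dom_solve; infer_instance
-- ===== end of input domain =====

-- B replaces A's recursion with an explicit op-list collected by a loop and a reverse fold; same string, similar cost (objective: alternative).


-- ===== PORT A =====
-- Literal transliteration of A's recursion; the 'n ≤ 0' totality guard is
-- unreachable under Pre_solve (the Python recurses forever there: RecursionError).
def solve (n : Int) : String :=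
  if n ≤ 0 then "2"
  else if n = 1 then "2"
  else if PySem.Int.mod n 2 = 0 then "(" ++ solve (PySem.Int.floordiv n 2) ++ ")^2"
  else "(2*" ++ solve (n - 1) ++ ")"
termination_by n.toNat
decreasing_by
  · simp; omega
  · omega

-- ===== PORT B =====
-- Phase 1 of Source B: the while-loop collecting the operations in order
-- (true = 'square', false = 'times2'); the loop exits exactly when n ≤ 1.
def solveOps (n : Int) : List Bool :=
  if n ≤ 1 then []
  else if PySem.Int.mod n 2 = 0 then true :: solveOps (PySem.Int.floordiv n 2)
  else false :: solveOps (n - 1)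
termination_by n.toNat
decreasing_by
  · simp; omega
  · omega

-- Phase 2 of Source B: the fold step building the string from "2".
def solveStep (s : String) (op : Bool) : String :=
  if op then "(" ++ s ++ ")^2" else "(2*" ++ s ++ ")"

def solve_alt (n : Int) : String :=
  (solveOps n).reverse.foldl solveStep "2"

-- ===== PRECONDITION & SPEC =====
-- Pre_ excludes n ≤ 0, where Python A raises RecursionError.
def Pre_solve (n : Int) : Prop := 1 ≤ n
instance (n : Int) : Decidable (Pre_solve n) := by unfold Pre_solve; infer_instance
def pvWitness_solve : Int := (6)

def Spec_solve (n : Int) (out : String) : Prop := out = solve_alt n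
instance (n : Int) (out : String) : Decidable (Spec_solve n out) := by unfold Spec_solve; infer_instance

-- ===== CLAIM (what is proved, stated in full; the proofs are below) =====
def Claim_equal_solve : Prop := ∀ (n : Int), Dom_solve n → Pre_solve n → Spec_solve n (solve n)

-- ===== LEMMAS AND PROOFS =====

-- Python's // by 2 is Lean's ediv for nonnegative arguments
theorem pvFdiv2 (n : Int) : PySem.Int.floordiv n 2 = n / 2 := by
  simp [PySem.Int.floordiv, Int.fdiv_eq_ediv_of_nonneg]

theorem solve_eq_fold (k : Nat) : ∀ (n : Int), n.toNat ≤ k → 1 ≤ n →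
    solve n = (solveOps n).reverse.foldl solveStep "2" := by
  induction k with
  | zero => intro n hk h1; omega
  | succ k ih =>
    intro n hk h1
    rw [solve, solveOps]
    rw [if_neg (by omega : ¬ n ≤ 0)]
    by_cases he : n = 1
    · subst he; simp
    · have hn2 : 2 ≤ n := by omega
      rw [if_neg he, if_neg (by omega : ¬ n ≤ 1)]
      by_cases hev : PySem.Int.mod n 2 = 0
      · rw [if_pos hev, if_pos hev, List.reverse_cons, List.foldl_append]
        have hq : solve (PySem.Int.floordiv n 2)
            = (solveOps (PySem.Int.floordiv n 2)).reverse.foldl solveStep "2" := by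
          apply ih
          · rw [pvFdiv2]; omega
          · rw [pvFdiv2]; omega
        rw [hq, List.foldl, solveStep]; simp
      · rw [if_neg hev, if_neg hev, List.reverse_cons, List.foldl_append]
        have hq : solve (n - 1)
            = (solveOps (n - 1)).reverse.foldl solveStep "2" := by
          apply ih <;> omega
        rw [hq, List.foldl, solveStep]; simp

-- ===== VERDICT (by name: the statement is the Claim_ definition above) =====
theorem solve_spec : Claim_equal_solve := by
  intro n _ hpre
  unfold Spec_solve solve_alt
  exact solve_eq_fold n.toNat n le_rfl hpre
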